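-- pv_equiv track=rewrite | github.com/ved-hg/chatbots | Chatbots/faq_chatbot/faq_chatbot.py | chunk_qa_blocks
-- ===== SOURCE A (Python) =====
-- def chunk_qa_blocks(blocks, max_pairs=5):
--     chunks, temp = [], []
--     for block in blocks:
--         temp.append(block)
--         if len(temp) >= max_pairs:
--             chunks.append("\n\n".join(temp))
--             temp = []
--     if temp:
--         chunks.append("\n\n".join(temp))
--     return chunks
-- ===== SOURCE B (Python) =====
-- def chunk_qa_blocks(blocks, max_pairs=5):
--     blocks = list(blocks)
--     step = max_pairs if max_pairs > 0 else 1
--     out = []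
--     while blocks:
--         out.append("\n\n".join(blocks[:step]))
--         blocks = blocks[step:]
--     return out
-- ===== Notes on version B (the rewrite author's own statement) =====
-- stated objective: alternative
-- what changed: Replaces A's per-block accumulate-until-full-then-flush loop with per-chunk slicing: repeatedly join the first max(max_pairs,1) blocks and drop them.
import Mathlib
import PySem

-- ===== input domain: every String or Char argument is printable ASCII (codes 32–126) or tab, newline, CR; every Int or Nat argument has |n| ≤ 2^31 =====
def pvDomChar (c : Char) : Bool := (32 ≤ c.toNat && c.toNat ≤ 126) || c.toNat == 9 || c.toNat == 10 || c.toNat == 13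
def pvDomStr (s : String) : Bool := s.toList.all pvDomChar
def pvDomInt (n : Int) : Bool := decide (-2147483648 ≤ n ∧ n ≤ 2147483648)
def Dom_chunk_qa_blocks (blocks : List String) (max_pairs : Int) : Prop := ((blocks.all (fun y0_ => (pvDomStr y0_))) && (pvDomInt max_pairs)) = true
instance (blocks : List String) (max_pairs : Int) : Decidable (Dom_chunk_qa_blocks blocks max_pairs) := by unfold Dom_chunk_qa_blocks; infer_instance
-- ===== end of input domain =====

-- B differs from A only in structure (per-chunk slicing instead of accumulate-and-flush); equal on all inputs.

-- ===== PORT A =====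
-- loop body: temp.append(block); if len(temp) >= max_pairs: flush temp into chunks
def pvLoopA (max_pairs : Int) (st : List String × List String) (block : String) : List String × List String :=
  let temp := st.2 ++ [block]
  if max_pairs ≤ (temp.length : Int) then (st.1 ++ [PySem.Str.join "\n\n" temp], [])
  else (st.1, temp)

-- final: if temp: chunks.append("\n\n".join(temp))
def pvFinishA (st : List String × List String) : List String :=
  if st.2 = [] then st.1 else st.1 ++ [PySem.Str.join "\n\n" st.2]

def chunk_qa_blocks (blocks : List String) (max_pairs : Int) : List String :=
  pvFinishA (blocks.foldl (pvLoopA max_pairs) ([], []))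

-- ===== PORT B =====
-- while blocks: out.append("\n\n".join(blocks[:step])); blocks = blocks[step:]
-- km1 = step - 1 (step ≥ 1), so blocks[:step] = b :: rest.take km1 and blocks[step:] = rest.drop km1
def pvGoB (km1 : Nat) : List String → List String
  | [] => []
  | b :: rest => PySem.Str.join "\n\n" (b :: rest.take km1) :: pvGoB km1 (rest.drop km1)
termination_by bs => bs.length
decreasing_by simp

def chunk_qa_blocks_alt (blocks : List String) (max_pairs : Int) : List String :=
  let step : Int := if 0 < max_pairs then max_pairs else 1
  pvGoB (step.toNat - 1) blocks

-- ===== PRECONDITION & SPEC =====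
def Spec_chunk_qa_blocks (blocks : List String) (max_pairs : Int) (out : List String) : Prop := out = chunk_qa_blocks_alt blocks max_pairs
instance (blocks : List String) (max_pairs : Int) (out : List String) : Decidable (Spec_chunk_qa_blocks blocks max_pairs out) := by unfold Spec_chunk_qa_blocks; infer_instance

-- ===== CLAIM (what is proved, stated in full; the proofs are below) =====
def Claim_equal_chunk_qa_blocks : Prop := ∀ (blocks : List String) (max_pairs : Int), Dom_chunk_qa_blocks blocks max_pairs → Spec_chunk_qa_blocks blocks max_pairs (chunk_qa_blocks blocks max_pairs)

-- ===== LEMMAS AND PROOFS =====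

-- taking a full group from a nonempty list
lemma pvGoB_ne (km1 : Nat) (xs : List String) (h : xs ≠ []) :
    pvGoB km1 xs = PySem.Str.join "\n\n" (xs.take (km1 + 1)) :: pvGoB km1 (xs.drop (km1 + 1)) := by
  cases xs with
  | nil => exact absurd rfl h
  | cons b rest =>
    conv_lhs => rw [pvGoB]
    simp

lemma pv_key (mp : Int) (km1 : Nat)
    (h : ∀ n : Nat, 1 ≤ n → (mp ≤ (n : Int) ↔ km1 + 1 ≤ n)) :
    ∀ (bs temp chunks : List String), temp.length ≤ km1 →
      pvFinishA (bs.foldl (pvLoopA mp) (chunks, temp)) = chunks ++ pvGoB km1 (temp ++ bs) := by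
  intro bs
  induction bs with
  | nil =>
    intro temp chunks hlen
    cases temp with
    | nil => simp [pvFinishA]; rw [pvGoB]
    | cons t ts =>
      simp only [List.foldl_nil, List.append_nil, pvFinishA]
      rw [pvGoB_ne km1 (t :: ts) (by simp)]
      have h1 : (t :: ts).take (km1 + 1) = t :: ts :=
        List.take_of_length_le (by simp at hlen ⊢; omega)
      have h2 : (t :: ts).drop (km1 + 1) = [] :=
        List.drop_eq_nil_of_le (by simp at hlen ⊢; omega)
      rw [h1, h2, pvGoB]
      simp
  | cons b rest ih =>
    intro temp chunks hlen
    simp only [List.foldl_cons]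
    by_cases hc : mp ≤ ((temp ++ [b]).length : Int)
    · have hge : km1 + 1 ≤ (temp ++ [b]).length :=
        (h _ (by simp)).mp (by simpa using hc)
      have hlen' : temp.length = km1 := by simp at hge ⊢; omega
      rw [show pvLoopA mp (chunks, temp) b
            = (chunks ++ [PySem.Str.join "\n\n" (temp ++ [b])], []) by
          simp only [pvLoopA]; rw [if_pos hc]]
      rw [ih [] (chunks ++ [PySem.Str.join "\n\n" (temp ++ [b])]) (by simp)]
      rw [pvGoB_ne km1 (temp ++ b :: rest) (by simp)]
      have htake : (temp ++ b :: rest).take (km1 + 1) = temp ++ [b] := by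
        rw [List.take_append]
        simp [hlen']
      have hdrop : (temp ++ b :: rest).drop (km1 + 1) = rest := by
        rw [List.drop_append]
        simp [hlen']
      simp [htake, hdrop]
    · have hlt : ¬ km1 + 1 ≤ (temp ++ [b]).length := fun hk =>
        hc ((h _ (by simp)).mpr (by simpa using hk))
      have hlen' : (temp ++ [b]).length ≤ km1 := by omega
      rw [show pvLoopA mp (chunks, temp) b = (chunks, temp ++ [b]) by
          simp only [pvLoopA]; rw [if_neg hc]]
      rw [ih (temp ++ [b]) chunks hlen']
      simp

-- ===== VERDICT (by name: the statement is the Claim_ definition above) =====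
theorem chunk_qa_blocks_spec : Claim_equal_chunk_qa_blocks := by
  intro blocks max_pairs _
  unfold Spec_chunk_qa_blocks chunk_qa_blocks chunk_qa_blocks_alt
  have h : ∀ n : Nat, 1 ≤ n →
      (max_pairs ≤ (n : Int) ↔ ((if 0 < max_pairs then max_pairs else 1).toNat - 1) + 1 ≤ n) := by
    intro n hn
    split_ifs with hmp <;> omega
  simpa using pv_key max_pairs _ h blocks [] []
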